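-- pv_equiv track=rewrite | github.com/mathiashatlestad/aoc2024 | 2024/12_garden_groups/aoc202412.py | scan_horizontal
-- ===== SOURCE A (Python) =====
-- def scan_horizontal(this_set, i, j_min, j_max, already_forward_edge, already_behind_edge):
--     forward_edge = 0
--     behind_edge = 0
--     for j in range(j_min - 1, j_max + 1):
--
--         if (i, j) not in this_set:
--             continue
--
--         if (i, j-1) not in this_set:
--             if (i-1, j) not in already_behind_edge:
--                 behind_edge+=1
--             already_behind_edge.add((i, j))
--
--         if (i, j+1) not in this_set:
--             if (i-1, j) not in already_forward_edge:
--                 forward_edge+=1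
--             already_forward_edge.add((i, j))
--
--     return forward_edge + behind_edge
-- ===== SOURCE B (Python) =====
-- def scan_horizontal(this_set, i, j_min, j_max, already_forward_edge, already_behind_edge):
--     # Sort-then-scan over row i's columns: each maximal run of consecutive columns
--     # contributes its start (behind edge) and its end (forward edge); the j-range is
--     # only a window filter. Cross-row dedup and set updates work as in the task spec.
--     cols = sorted(j for (r, j) in this_set if r == i)
--     total = 0
--     for prev, j, nxt in zip([None] + cols, cols, cols[1:] + [None]):
--         if j < j_min - 1 or j > j_max:
--             continue
--         if prev != j - 1:  # run start -> behind edge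
--             if (i - 1, j) not in already_behind_edge:
--                 total += 1
--             already_behind_edge.add((i, j))
--         if nxt != j + 1:   # run end -> forward edge
--             if (i - 1, j) not in already_forward_edge:
--                 total += 1
--             already_forward_edge.add((i, j))
--     return total
-- ===== Notes on version B (the rewrite author's own statement) =====
-- stated objective: alternative
-- what changed: A walks the whole j-range testing 3 set memberships per position; B instead extracts row i's columns from the set itself, sorts them, and scans consecutive runs with a prev/next zip (run starts = behind edges, run ends = forward edges), using the j-range only as a window filter.
import Mathlib
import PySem

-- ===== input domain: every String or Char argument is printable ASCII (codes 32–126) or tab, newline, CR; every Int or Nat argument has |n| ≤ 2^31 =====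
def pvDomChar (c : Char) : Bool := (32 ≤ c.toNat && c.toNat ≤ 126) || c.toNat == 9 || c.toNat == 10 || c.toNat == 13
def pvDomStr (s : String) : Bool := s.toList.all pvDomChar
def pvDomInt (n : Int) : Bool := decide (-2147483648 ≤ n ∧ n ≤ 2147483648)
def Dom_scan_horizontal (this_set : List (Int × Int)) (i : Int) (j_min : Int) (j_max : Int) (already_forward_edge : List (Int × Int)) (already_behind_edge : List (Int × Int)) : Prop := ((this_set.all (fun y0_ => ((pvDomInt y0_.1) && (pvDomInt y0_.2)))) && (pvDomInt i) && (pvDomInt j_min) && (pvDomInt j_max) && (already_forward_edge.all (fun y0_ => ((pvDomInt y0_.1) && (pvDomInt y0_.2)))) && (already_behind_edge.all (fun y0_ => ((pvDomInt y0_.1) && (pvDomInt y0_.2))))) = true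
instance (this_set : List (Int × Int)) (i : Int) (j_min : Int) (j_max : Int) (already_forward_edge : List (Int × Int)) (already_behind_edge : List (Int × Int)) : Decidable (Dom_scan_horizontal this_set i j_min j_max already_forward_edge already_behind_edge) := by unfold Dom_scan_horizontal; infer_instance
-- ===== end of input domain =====

-- B replaces A's range walk (3 membership tests per j) by sort-then-run-scan over row i's own
-- columns ("alternative"); both Pythons mutate the two already_* sets identically — the theorem
-- below is about the RETURN value only.

-- ===== PORT A =====
-- one iteration of A's loop body over the state (forward_edge, behind_edge, already_forward_edge, already_behind_edge)
def pvStepA (this_set : List (Int × Int)) (i : Int)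
    (st : Int × Int × List (Int × Int) × List (Int × Int)) (j : Int) :
    Int × Int × List (Int × Int) × List (Int × Int) :=
  if !(PySem.Set.contains this_set (i, j)) then st
  else
    let bhd := if !(PySem.Set.contains this_set (i, j - 1)) then
        (if !(PySem.Set.contains st.2.2.2 (i - 1, j)) then st.2.1 + 1 else st.2.1) else st.2.1
    let abe := if !(PySem.Set.contains this_set (i, j - 1)) then
        PySem.Set.add st.2.2.2 (i, j) else st.2.2.2
    let fwd := if !(PySem.Set.contains this_set (i, j + 1)) then
        (if !(PySem.Set.contains st.2.2.1 (i - 1, j)) then st.1 + 1 else st.1) else st.1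
    let afe := if !(PySem.Set.contains this_set (i, j + 1)) then
        PySem.Set.add st.2.2.1 (i, j) else st.2.2.1
    (fwd, bhd, afe, abe)

def scan_horizontal (this_set : List (Int × Int)) (i : Int) (j_min : Int) (j_max : Int) (already_forward_edge : List (Int × Int)) (already_behind_edge : List (Int × Int)) : Int :=
  let r := (PySem.List.pyRange (j_min - 1) (j_max + 1) 1).foldl (pvStepA this_set i)
      (0, 0, already_forward_edge, already_behind_edge)
  r.1 + r.2.1

-- ===== PORT B =====
-- one iteration of B's loop body over (total, already_forward_edge, already_behind_edge);
-- the triple is (prev, j, nxt) from the zip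
def pvStepB (i j_min j_max : Int)
    (st : Int × List (Int × Int) × List (Int × Int)) (t : Option Int × Int × Option Int) :
    Int × List (Int × Int) × List (Int × Int) :=
  let j := t.2.1
  if j < j_min - 1 || j > j_max then st
  else
    let st1 := if !(t.1 == some (j - 1)) then
        ((if !(PySem.Set.contains st.2.2 (i - 1, j)) then st.1 + 1 else st.1),
          st.2.1, PySem.Set.add st.2.2 (i, j))
      else st
    if !(t.2.2 == some (j + 1)) then
        ((if !(PySem.Set.contains st1.2.1 (i - 1, j)) then st1.1 + 1 else st1.1),
          PySem.Set.add st1.2.1 (i, j), st1.2.2)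
      else st1

def scan_horizontal_alt (this_set : List (Int × Int)) (i : Int) (j_min : Int) (j_max : Int) (already_forward_edge : List (Int × Int)) (already_behind_edge : List (Int × Int)) : Int :=
  let cols := PySem.List.sorted ((this_set.filter (fun p => p.1 == i)).map Prod.snd) (fun x => x) false
  let triples := (none :: cols.map some).zip (cols.zip (cols.tail.map some ++ [none]))
  (triples.foldl (pvStepB i j_min j_max) (0, already_forward_edge, already_behind_edge)).1

-- ===== PRECONDITION & SPEC =====
-- Pre_ excludes lists with duplicate entries: A's this_set argument is a Python set, whose List
-- encoding holds the DISTINCT elements, so a duplicate-carrying list encodes no Python input.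
def Pre_scan_horizontal (this_set : List (Int × Int)) (i : Int) (j_min : Int) (j_max : Int) (already_forward_edge : List (Int × Int)) (already_behind_edge : List (Int × Int)) : Prop :=
  this_set.Nodup
instance (this_set : List (Int × Int)) (i : Int) (j_min : Int) (j_max : Int) (already_forward_edge : List (Int × Int)) (already_behind_edge : List (Int × Int)) : Decidable (Pre_scan_horizontal this_set i j_min j_max already_forward_edge already_behind_edge) := by unfold Pre_scan_horizontal; infer_instance

def pvWitness_scan_horizontal : (List (Int × Int)) × Int × Int × Int × (List (Int × Int)) × (List (Int × Int)) :=
  ([(0, 0), (0, 1), (0, 3)], 0, 0, 3, [(-1, 3)], [])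

def Spec_scan_horizontal (this_set : List (Int × Int)) (i : Int) (j_min : Int) (j_max : Int) (already_forward_edge : List (Int × Int)) (already_behind_edge : List (Int × Int)) (out : Int) : Prop := out = scan_horizontal_alt this_set i j_min j_max already_forward_edge already_behind_edge
instance (this_set : List (Int × Int)) (i : Int) (j_min : Int) (j_max : Int) (already_forward_edge : List (Int × Int)) (already_behind_edge : List (Int × Int)) (out : Int) : Decidable (Spec_scan_horizontal this_set i j_min j_max already_forward_edge already_behind_edge out) := by unfold Spec_scan_horizontal; infer_instance

-- ===== CLAIM (what is proved, stated in full; the proofs are below) =====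
def Claim_equal_scan_horizontal : Prop := ∀ (this_set : List (Int × Int)) (i : Int) (j_min : Int) (j_max : Int) (already_forward_edge : List (Int × Int)) (already_behind_edge : List (Int × Int)), Dom_scan_horizontal this_set i j_min j_max already_forward_edge already_behind_edge → Pre_scan_horizontal this_set i j_min j_max already_forward_edge already_behind_edge → Spec_scan_horizontal this_set i j_min j_max already_forward_edge already_behind_edge (scan_horizontal this_set i j_min j_max already_forward_edge already_behind_edge)

-- ===== LEMMAS AND PROOFS =====

-- adding a different element does not change a membership test
theorem pv_contains_add_ne (s : List (Int × Int)) (x y : Int × Int) (h : y ≠ x) :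
    PySem.Set.contains (PySem.Set.add s x) y = PySem.Set.contains s y := by
  by_cases hm : x ∈ s
  · rw [PySem.Set.add_of_mem hm]
  · rw [PySem.Set.add_of_not_mem hm]
    simp [h]

-- A's loop invariant: the fold from any state equals the start counters plus two filter counts
-- over the remaining range, provided the accumulated sets agree with the reference sets on row i-1.
theorem pv_foldA_eq (ts : List (Int × Int)) (i : Int) (l : List Int)
    (f b : Int) (afe abe afe0 abe0 : List (Int × Int))
    (hf : ∀ j : Int, PySem.Set.contains afe (i - 1, j) = PySem.Set.contains afe0 (i - 1, j))
    (hb : ∀ j : Int, PySem.Set.contains abe (i - 1, j) = PySem.Set.contains abe0 (i - 1, j)) :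
    (l.foldl (pvStepA ts i) (f, b, afe, abe)).1 + (l.foldl (pvStepA ts i) (f, b, afe, abe)).2.1 =
    f + b
    + ((l.filter (fun j => !(PySem.Set.contains abe0 (i - 1, j)) &&
          (!(PySem.Set.contains ts (i, j - 1)) && PySem.Set.contains ts (i, j)))).length : Int)
    + ((l.filter (fun j => !(PySem.Set.contains afe0 (i - 1, j)) &&
          (!(PySem.Set.contains ts (i, j + 1)) && PySem.Set.contains ts (i, j)))).length : Int) := by
  induction l generalizing f b afe abe with
  | nil => simp
  | cons j l ih =>
    have hne : ∀ j' : Int, ((i : Int) - 1, j') ≠ (i, j) := by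
      intro j' hcontra
      have h1 : (i : Int) - 1 = i := congrArg Prod.fst hcontra
      omega
    rw [List.foldl_cons, List.filter_cons, List.filter_cons]
    by_cases hp : PySem.Set.contains ts (i, j) = true
    · have hstep : pvStepA ts i (f, b, afe, abe) j =
          (((if !(PySem.Set.contains ts (i, j + 1)) then
              (if !(PySem.Set.contains afe0 (i - 1, j)) then f + 1 else f) else f),
            (if !(PySem.Set.contains ts (i, j - 1)) then
              (if !(PySem.Set.contains abe0 (i - 1, j)) then b + 1 else b) else b),
            (if !(PySem.Set.contains ts (i, j + 1)) then PySem.Set.add afe (i, j) else afe),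
            (if !(PySem.Set.contains ts (i, j - 1)) then PySem.Set.add abe (i, j) else abe))) := by
        simp only [pvStepA, hp, Bool.not_true, Bool.false_eq_true, if_false, hf j, hb j]
      rw [hstep]
      have hf' : ∀ j' : Int,
          PySem.Set.contains (if !(PySem.Set.contains ts (i, j + 1)) then
            PySem.Set.add afe (i, j) else afe) (i - 1, j')
          = PySem.Set.contains afe0 (i - 1, j') := by
        intro j'; split
        · rw [pv_contains_add_ne _ _ _ (hne j')]; exact hf j'
        · exact hf j'
      have hb' : ∀ j' : Int,
          PySem.Set.contains (if !(PySem.Set.contains ts (i, j - 1)) then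
            PySem.Set.add abe (i, j) else abe) (i - 1, j')
          = PySem.Set.contains abe0 (i - 1, j') := by
        intro j'; split
        · rw [pv_contains_add_ne _ _ _ (hne j')]; exact hb j'
        · exact hb j'
      rw [ih _ _ _ _ hf' hb']
      simp only [hp, Bool.and_true]
      by_cases hL : PySem.Set.contains ts (i, j - 1) = true <;>
      by_cases hR : PySem.Set.contains ts (i, j + 1) = true <;>
      by_cases hA : PySem.Set.contains afe0 (i - 1, j) = true <;>
      by_cases hB : PySem.Set.contains abe0 (i - 1, j) = true <;>
        simp only [hL, hR, hA, hB, Bool.not_true, Bool.not_false, Bool.false_eq_true,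
          Bool.and_false, Bool.and_true, if_false, if_true, List.length_cons] <;>
        push_cast <;> omega
    · have hstep : pvStepA ts i (f, b, afe, abe) j = (f, b, afe, abe) := by
        simp only [pvStepA, hp]
        simp
      rw [hstep, ih f b afe abe hf hb]
      have hp' : PySem.Set.contains ts (i, j) = false := by simpa using hp
      simp only [hp', Bool.and_false, Bool.false_eq_true, if_false]

-- the zipped triple list peels off its head element
theorem pv_triples_cons (p : Option Int) (j : Int) (rest : List Int) :
    (p :: ((j :: rest).map some)).zip ((j :: rest).zip ((j :: rest).tail.map some ++ [none]))
    = (p, j, rest.head?) ::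
      ((some j :: rest.map some).zip (rest.zip (rest.tail.map some ++ [none]))) := by
  cases rest <;> simp

-- B's loop invariant: over a suffix l of the strictly increasing column list C, with prev the
-- element just before l in C, the fold's total equals the start total plus two filter counts.
theorem pv_foldB_eq (i jm jx : Int) (C : List Int) (l : List Int) (prev : Option Int)
    (t : Int) (afe abe afe0 abe0 : List (Int × Int))
    (hchain : l.Pairwise (· < ·))
    (hsub : ∀ x ∈ l, x ∈ C)
    (hcover : ∀ x ∈ C, x ∈ l ∨ ∃ p, prev = some p ∧ x ≤ p)
    (hprev : ∀ p, prev = some p → p ∈ C ∧ ∀ x ∈ l, p < x)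
    (hf : ∀ j : Int, PySem.Set.contains afe (i - 1, j) = PySem.Set.contains afe0 (i - 1, j))
    (hb : ∀ j : Int, PySem.Set.contains abe (i - 1, j) = PySem.Set.contains abe0 (i - 1, j)) :
    (((prev :: l.map some).zip (l.zip (l.tail.map some ++ [none]))).foldl
        (pvStepB i jm jx) (t, afe, abe)).1
    = t + ((l.filter (fun j => !(decide (j < jm - 1) || decide (j > jx)) &&
            (!(decide ((j - 1) ∈ C)) && !(PySem.Set.contains abe0 (i - 1, j))))).length : Int)
        + ((l.filter (fun j => !(decide (j < jm - 1) || decide (j > jx)) &&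
            (!(decide ((j + 1) ∈ C)) && !(PySem.Set.contains afe0 (i - 1, j))))).length : Int) := by
  induction l generalizing prev t afe abe with
  | nil => simp
  | cons j rest ih =>
    have hjC : j ∈ C := hsub j (by simp)
    have hrest_lt : ∀ x ∈ rest, j < x := (List.pairwise_cons.mp hchain).1
    have hchain' : rest.Pairwise (· < ·) := (List.pairwise_cons.mp hchain).2
    have hkey1 : (prev == some (j - 1)) = decide ((j - 1) ∈ C) := by
      by_cases hmem : (j - 1) ∈ C
      · rcases hcover (j - 1) hmem with h | ⟨p, hp, hle⟩
        · rcases List.mem_cons.mp h with h | h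
          · omega
          · exact absurd (hrest_lt _ h) (by omega)
        · obtain ⟨_, hplt⟩ := hprev p hp
          have : p = j - 1 := by have := hplt j (by simp); omega
          rw [hp, this]
          simp [hmem]
      · have hne : prev ≠ some (j - 1) := by
          intro hh
          exact hmem (hprev _ hh).1
        simp only [hmem, decide_false]
        exact beq_eq_false_iff_ne.mpr hne
    have hkey2 : (rest.head? == some (j + 1)) = decide ((j + 1) ∈ C) := by
      by_cases hmem : (j + 1) ∈ C
      · have hin : (j + 1) ∈ rest := by
          rcases hcover (j + 1) hmem with h | ⟨p, hp, hle⟩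
          · rcases List.mem_cons.mp h with h | h
            · omega
            · exact h
          · obtain ⟨_, hplt⟩ := hprev p hp
            have := hplt j (by simp)
            omega
        rcases rest with _ | ⟨r, rest'⟩
        · simp at hin
        · have hrall : ∀ x ∈ rest', r < x := (List.pairwise_cons.mp hchain').1
          have hr1 : j < r := hrest_lt r (by simp)
          have : r = j + 1 := by
            rcases List.mem_cons.mp hin with h | h
            · omega
            · have := hrall _ h
              omega
          simp [this, hmem]
      · have hne : rest.head? ≠ some (j + 1) := by
          intro hh
          exact hmem (hsub (j + 1) (by
            rcases rest with _ | ⟨r, rest'⟩ <;> simp_all))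
        simp only [hmem, decide_false]
        exact beq_eq_false_iff_ne.mpr hne
    have hsub' : ∀ x ∈ rest, x ∈ C := fun x hx => hsub x (by simp [hx])
    have hcover' : ∀ x ∈ C, x ∈ rest ∨ ∃ p, (some j : Option Int) = some p ∧ x ≤ p := by
      intro x hx
      rcases hcover x hx with h | ⟨p, hp, hle⟩
      · rcases List.mem_cons.mp h with h | h
        · exact Or.inr ⟨j, rfl, le_of_eq h⟩
        · exact Or.inl h
      · obtain ⟨_, hplt⟩ := hprev p hp
        have := hplt j (by simp)
        exact Or.inr ⟨j, rfl, by omega⟩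
    have hprev' : ∀ p, (some j : Option Int) = some p → p ∈ C ∧ ∀ x ∈ rest, p < x := by
      intro p hp
      rw [Option.some_inj] at hp
      subst hp
      exact ⟨hjC, hrest_lt⟩
    rw [pv_triples_cons, List.foldl_cons, List.filter_cons, List.filter_cons]
    have hne : ∀ j' : Int, ((i : Int) - 1, j') ≠ (i, j) := by
      intro j' hcontra
      have h1 : (i : Int) - 1 = i := congrArg Prod.fst hcontra
      omega
    by_cases hr : (j < jm - 1 ∨ j > jx)
    · have hrb : (decide (j < jm - 1) || decide (j > jx)) = true := by
        rcases hr with h | h <;> simp [h]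
      have hstep : pvStepB i jm jx (t, afe, abe) (prev, j, rest.head?) = (t, afe, abe) := by
        simp only [pvStepB]
        simp [hrb]
      rw [hstep, ih _ _ _ _ hchain' hsub' hcover' hprev' hf hb]
      simp only [hrb, Bool.not_true, Bool.false_and, Bool.false_eq_true, if_false]
    · have hrb : (decide (j < jm - 1) || decide (j > jx)) = false := by
        simp only [Bool.or_eq_false_iff, decide_eq_false_iff_not]
        omega
      have hstep : pvStepB i jm jx (t, afe, abe) (prev, j, rest.head?) =
          (((if !(decide ((j + 1) ∈ C)) then
              (if !(PySem.Set.contains afe0 (i - 1, j)) then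
                (if !(decide ((j - 1) ∈ C)) then
                  (if !(PySem.Set.contains abe0 (i - 1, j)) then t + 1 else t) else t) + 1
               else (if !(decide ((j - 1) ∈ C)) then
                  (if !(PySem.Set.contains abe0 (i - 1, j)) then t + 1 else t) else t))
             else (if !(decide ((j - 1) ∈ C)) then
                  (if !(PySem.Set.contains abe0 (i - 1, j)) then t + 1 else t) else t)),
            (if !(decide ((j + 1) ∈ C)) then PySem.Set.add afe (i, j) else afe),
            (if !(decide ((j - 1) ∈ C)) then PySem.Set.add abe (i, j) else abe))) := by
        have hfj : ((i - 1, j) ∈ afe) = ((i - 1, j) ∈ afe0) := by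
          have := hf j; simpa [PySem.Set.contains, List.contains_iff_mem] using this
        have hbj : ((i - 1, j) ∈ abe) = ((i - 1, j) ∈ abe0) := by
          have := hb j; simpa [PySem.Set.contains, List.contains_iff_mem] using this
        simp only [pvStepB, hrb, Bool.false_eq_true, if_false, hkey1, hkey2]
        by_cases k1 : ((j - 1) ∈ C) <;> by_cases k2 : ((j + 1) ∈ C) <;>
          simp [k1, k2, hfj, hbj]
      rw [hstep]
      have hf' : ∀ j' : Int,
          PySem.Set.contains (if !(decide ((j + 1) ∈ C)) then
            PySem.Set.add afe (i, j) else afe) (i - 1, j')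
          = PySem.Set.contains afe0 (i - 1, j') := by
        intro j'; split
        · rw [pv_contains_add_ne _ _ _ (hne j')]; exact hf j'
        · exact hf j'
      have hb' : ∀ j' : Int,
          PySem.Set.contains (if !(decide ((j - 1) ∈ C)) then
            PySem.Set.add abe (i, j) else abe) (i - 1, j')
          = PySem.Set.contains abe0 (i - 1, j') := by
        intro j'; split
        · rw [pv_contains_add_ne _ _ _ (hne j')]; exact hb j'
        · exact hb j'
      rw [ih _ _ _ _ hchain' hsub' hcover' hprev' hf' hb']
      simp only [hrb, Bool.not_false, Bool.true_and]
      by_cases k1 : ((j - 1) ∈ C) <;> by_cases k2 : ((j + 1) ∈ C) <;>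
      by_cases hA : PySem.Set.contains afe0 (i - 1, j) = true <;>
      by_cases hB : PySem.Set.contains abe0 (i - 1, j) = true <;>
        simp only [k1, k2, hA, hB, decide_true, decide_false, Bool.not_true, Bool.not_false,
          Bool.false_eq_true, Bool.and_false, Bool.and_true, Bool.false_and, Bool.true_and,
          if_false, if_true, List.length_cons] <;>
        push_cast <;> omega

-- membership in B's column list is exactly row-i membership in the set
theorem pv_mem_cols (ts : List (Int × Int)) (i x : Int) :
    (x ∈ PySem.List.sorted ((ts.filter (fun p => p.1 == i)).map Prod.snd) (fun y => y) false)
    ↔ (i, x) ∈ ts := by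
  rw [PySem.List.mem_sorted]
  simp only [List.mem_map, List.mem_filter, beq_iff_eq]
  constructor
  · rintro ⟨⟨a, b⟩, ⟨hmem, rfl⟩, rfl⟩
    exact hmem
  · intro h
    exact ⟨(i, x), ⟨h, rfl⟩, rfl⟩

-- B's column list is strictly increasing when this_set has no duplicates
theorem pv_cols_chain (ts : List (Int × Int)) (i : Int) (hnd : ts.Nodup) :
    (PySem.List.sorted ((ts.filter (fun p => p.1 == i)).map Prod.snd) (fun y => y) false).Pairwise
      (· < ·) := by
  have hnd2 : ((ts.filter (fun p => p.1 == i)).map Prod.snd).Nodup := by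
    refine (List.Nodup.filter _ hnd).map_on ?_
    intro a ha b hb hab
    have ha1 : a.1 = i := by simpa using (List.mem_filter.mp ha).2
    have hb1 : b.1 = i := by simpa using (List.mem_filter.mp hb).2
    exact Prod.ext (ha1.trans hb1.symm) hab
  have hle := PySem.List.sorted_pairwise ((ts.filter (fun p => p.1 == i)).map Prod.snd)
      (fun y => y)
  have hnd3 : (PySem.List.sorted ((ts.filter (fun p => p.1 == i)).map Prod.snd)
      (fun y => y) false).Nodup := (PySem.List.sorted_perm _ _ _).nodup_iff.mpr hnd2
  exact (hle.and hnd3).imp (fun {a b} h => lt_of_le_of_ne h.1 h.2)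

-- two Nodup lists with the same members have filters of equal length
theorem pv_filter_len_eq (l₁ l₂ : List Int) (p₁ p₂ : Int → Bool)
    (h₁ : l₁.Nodup) (h₂ : l₂.Nodup)
    (hmem : ∀ x, (x ∈ l₁ ∧ p₁ x) ↔ (x ∈ l₂ ∧ p₂ x)) :
    (l₁.filter p₁).length = (l₂.filter p₂).length := by
  have hperm : (l₁.filter p₁).Perm (l₂.filter p₂) := by
    rw [List.perm_ext_iff_of_nodup (h₁.filter _) (h₂.filter _)]
    intro x
    simp only [List.mem_filter]
    exact hmem x
  exact hperm.length_eq

-- ===== VERDICT (by name: the statement is the Claim_ definition above) =====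
theorem scan_horizontal_spec : Claim_equal_scan_horizontal := by
  intro ts i jm jx afe abe _ hnd
  show _ = _
  unfold scan_horizontal scan_horizontal_alt
  rw [pv_foldA_eq ts i _ 0 0 afe abe afe abe (fun _ => rfl) (fun _ => rfl)]
  set C := PySem.List.sorted ((ts.filter (fun p => p.1 == i)).map Prod.snd) (fun y => y) false
    with hCdef
  have hchain : C.Pairwise (· < ·) := pv_cols_chain ts i hnd
  have hndC : C.Nodup := List.Pairwise.imp (fun h => ne_of_lt h) hchain
  rw [pv_foldB_eq i jm jx C C none 0 afe abe afe abe hchain (fun x hx => hx)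
      (fun x hx => Or.inl hx) (fun p hp => nomatch hp) (fun _ => rfl) (fun _ => rfl)]
  have hmemC : ∀ x : Int, x ∈ C ↔ (i, x) ∈ ts := fun x => pv_mem_cols ts i x
  have hcont : ∀ x : Int, PySem.Set.contains ts (i, x) = decide (x ∈ C) := by
    intro x
    simp [PySem.Set.contains, hmemC x, List.contains_iff_mem]
  have hB : ((PySem.List.pyRange (jm - 1) (jx + 1) 1).filter
        (fun j => !(PySem.Set.contains abe (i - 1, j)) &&
          (!(PySem.Set.contains ts (i, j - 1)) && PySem.Set.contains ts (i, j)))).length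
      = (C.filter (fun j => !(decide (j < jm - 1) || decide (j > jx)) &&
          (!(decide ((j - 1) ∈ C)) && !(PySem.Set.contains abe (i - 1, j))))).length := by
    apply pv_filter_len_eq _ _ _ _ (PySem.List.nodup_pyRange_one _ _) hndC
    intro x
    rw [PySem.List.mem_pyRange_one]
    simp only [hcont, Bool.and_eq_true, Bool.not_eq_eq_eq_not, Bool.not_true, Bool.or_eq_false_iff,
      decide_eq_true_eq, decide_eq_false_iff_not, Bool.not_eq_true', Bool.not_eq_false']
    constructor
    · rintro ⟨⟨h1, h2⟩, h3, h4, h5⟩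
      exact ⟨by simpa using h5, ⟨by omega, by omega⟩, by simpa using h4, h3⟩
    · rintro ⟨h1, ⟨h2, h3⟩, h4, h5⟩
      exact ⟨⟨by omega, by omega⟩, h5, by simpa using h4, by simpa using h1⟩
  have hF : ((PySem.List.pyRange (jm - 1) (jx + 1) 1).filter
        (fun j => !(PySem.Set.contains afe (i - 1, j)) &&
          (!(PySem.Set.contains ts (i, j + 1)) && PySem.Set.contains ts (i, j)))).length
      = (C.filter (fun j => !(decide (j < jm - 1) || decide (j > jx)) &&
          (!(decide ((j + 1) ∈ C)) && !(PySem.Set.contains afe (i - 1, j))))).length := by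
    apply pv_filter_len_eq _ _ _ _ (PySem.List.nodup_pyRange_one _ _) hndC
    intro x
    rw [PySem.List.mem_pyRange_one]
    simp only [hcont, Bool.and_eq_true, Bool.not_eq_eq_eq_not, Bool.not_true, Bool.or_eq_false_iff,
      decide_eq_true_eq, decide_eq_false_iff_not, Bool.not_eq_true', Bool.not_eq_false']
    constructor
    · rintro ⟨⟨h1, h2⟩, h3, h4, h5⟩
      exact ⟨by simpa using h5, ⟨by omega, by omega⟩, by simpa using h4, h3⟩
    · rintro ⟨h1, ⟨h2, h3⟩, h4, h5⟩
      exact ⟨⟨by omega, by omega⟩, h5, by simpa using h4, by simpa using h1⟩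
  rw [hB, hF]
  ring
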